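-- pv_equiv track=rewrite | github.com/leticiasales/bioinfo | new.py | sym_val_2
-- ===== SOURCE A (Python) =====
-- def sym_val_2(a, b):
-- 	#procurar pela existência de casamento
-- 	#entre o sufixo de a e o prefixo de b
-- 	sym = []
-- 	for i in range(len(b)):
-- 		aux = a.find(b[i:])
-- 		if aux != -1:
-- 			size = len(b[i:])
-- 			sym.append(-1 * size)
-- 		aux = a.find(b[:i])
-- 		if aux != -1:
-- 			size = len(b[:i])
-- 			sym.append(size)
-- 	return(max(sym, key=abs) if len(sym) else 0)
-- ===== SOURCE B (Python) =====
-- def sym_val_2(a, b):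
--     # Binary search (containment is monotone in the piece length) for the longest
--     # suffix of b and the longest proper prefix of b occurring in a, then the tie rule.
--     n = len(b)
--
--     def largest(hi, piece):
--         lo = 0
--         while lo < hi:
--             mid = (lo + hi + 1) // 2
--             if piece(mid) in a:
--                 lo = mid
--             else:
--                 hi = mid - 1
--         return lo
--
--     ls = largest(n, lambda L: b[n - L:])
--     lp = largest(n - 1 if n > 0 else 0, lambda L: b[:L])
--     if ls > lp:
--         return -ls
--     if lp > ls:
--         return lp
--     return -ls if 2 * ls >= n else ls
-- ===== Notes on version B (the rewrite author's own statement) =====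
-- stated objective: faster
-- what changed: Instead of scanning every split point i and taking max(key=abs) over all found pieces, B binary-searches (containment in a is monotone in the piece length) for the longest suffix of b and the longest proper prefix of b occurring in a, then applies the sign/tie rule arithmetically.
import Mathlib
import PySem

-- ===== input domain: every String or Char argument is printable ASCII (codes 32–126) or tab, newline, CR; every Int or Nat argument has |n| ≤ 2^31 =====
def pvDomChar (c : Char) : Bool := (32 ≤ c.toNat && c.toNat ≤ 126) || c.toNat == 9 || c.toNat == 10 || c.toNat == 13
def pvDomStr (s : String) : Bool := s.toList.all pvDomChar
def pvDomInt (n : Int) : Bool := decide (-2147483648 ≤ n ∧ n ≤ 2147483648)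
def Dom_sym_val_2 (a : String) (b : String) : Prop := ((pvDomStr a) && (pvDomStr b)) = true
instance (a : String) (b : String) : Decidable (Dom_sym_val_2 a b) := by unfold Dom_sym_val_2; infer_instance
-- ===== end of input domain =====

-- B replaces A's scan over every split point (max over all found pieces, key=abs) with two
-- binary searches (substring containment is monotone in the piece length) for the longest
-- suffix and longest proper prefix of b occurring in a, plus the sign/tie rule; the timing
-- run measured B much faster at the largest sizes.
-- ===== PORT A =====
def sym_val_2 (a : String) (b : String) : Int :=
  let sym : List Int :=
    (PySem.List.pyRange 0 (PySem.Str.len b) 1).foldl (fun sym i =>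
      let sym :=
        if PySem.Str.find a (PySem.Str.slice b (some i) none) != -1 then
          sym ++ [-1 * (PySem.Str.len (PySem.Str.slice b (some i) none))]
        else sym
      if PySem.Str.find a (PySem.Str.slice b none (some i)) != -1 then
        sym ++ [PySem.Str.len (PySem.Str.slice b none (some i))]
      else sym) []
  if sym.length != 0 then PySem.List.maxD sym (fun x => |x|) 0 else 0


-- ===== PORT B =====
-- B-side helper: the 'largest' binary-search loop of Source B (pred L = piece(L) in a)
def pvLargest (pred : Int → Bool) (lo hi : Int) : Int :=
  if h : lo < hi then
    let mid := PySem.Int.floordiv (lo + hi + 1) 2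
    if pred mid then pvLargest pred mid hi else pvLargest pred lo (mid - 1)
  else lo
termination_by (hi - lo).toNat
decreasing_by
  · have := PySem.Int.floordiv_two_mid_bounds (lo := lo + 1) (hi := hi) (by omega)
    rw [show lo + 1 + hi = lo + hi + 1 from by ring] at this
    simp only [mid] at *; omega
  · have := PySem.Int.floordiv_two_mid_bounds (lo := lo + 1) (hi := hi) (by omega)
    rw [show lo + 1 + hi = lo + hi + 1 from by ring] at this
    simp only [mid] at *; omega

def sym_val_2_alt (a : String) (b : String) : Int :=
  let n : Int := PySem.Str.len b
  let ls := pvLargest (fun L => PySem.Str.isIn (PySem.Str.slice b (some (n - L)) none) a) 0 n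
  let lp := pvLargest (fun L => PySem.Str.isIn (PySem.Str.slice b none (some L)) a) 0
              (if n > 0 then n - 1 else 0)
  if ls > lp then -ls
  else if lp > ls then lp
  else if 2 * ls ≥ n then -ls else ls


-- ===== PRECONDITION & SPEC =====
def Spec_sym_val_2 (a : String) (b : String) (out : Int) : Prop := out = sym_val_2_alt a b
instance (a : String) (b : String) (out : Int) : Decidable (Spec_sym_val_2 a b out) := by unfold Spec_sym_val_2; infer_instance

-- ===== CLAIM (what is proved, stated in full; the proofs are below) =====
def Claim_equal_sym_val_2 : Prop := ∀ (a : String) (b : String), Dom_sym_val_2 a b → Spec_sym_val_2 a b (sym_val_2 a b)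

-- ===== LEMMAS AND PROOFS =====

-- Specification of the binary-search loop: for a predicate that is downward monotone,
-- pvLargest pred lo hi is the largest point of [lo,hi] where pred holds (given pred lo).
theorem pvLargest_spec (pred : Int → Bool) (B : Int)
    (mono : ∀ L M : Int, 0 ≤ L → L ≤ M → M ≤ B → pred M = true → pred L = true)
    (lo hi : Int) (h0 : 0 ≤ lo) (hle : lo ≤ hi) (hB : hi ≤ B) (hp : pred lo = true) :
    lo ≤ pvLargest pred lo hi ∧ pvLargest pred lo hi ≤ hi ∧
      pred (pvLargest pred lo hi) = true ∧
      ∀ L, pvLargest pred lo hi < L → L ≤ hi → pred L = false := by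
  rw [pvLargest]
  by_cases h : lo < hi
  · simp only [dif_pos h]
    have hb := PySem.Int.floordiv_two_mid_bounds (lo := lo + 1) (hi := hi) (by omega)
    rw [show lo + 1 + hi = lo + hi + 1 from by ring] at hb
    by_cases hpm : pred (PySem.Int.floordiv (lo + hi + 1) 2) = true
    · simp only [if_pos hpm]
      have IH := pvLargest_spec pred B mono (PySem.Int.floordiv (lo + hi + 1) 2) hi
        (by omega) (by omega) hB hpm
      exact ⟨by omega, IH.2.1, IH.2.2.1, IH.2.2.2⟩
    · rw [if_neg hpm]
      have IH := pvLargest_spec pred B mono lo (PySem.Int.floordiv (lo + hi + 1) 2 - 1)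
        h0 (by omega) (by omega) hp
      refine ⟨IH.1, by omega, IH.2.2.1, ?_⟩
      intro L h1 h2
      by_cases hL : L ≤ PySem.Int.floordiv (lo + hi + 1) 2 - 1
      · exact IH.2.2.2 L h1 hL
      · cases hPL : pred L with
        | false => rfl
        | true =>
          exact absurd (mono (PySem.Int.floordiv (lo + hi + 1) 2) L (by omega) (by omega)
            (by omega) hPL) (by simpa using hpm)
  · simp only [dif_neg h]
    exact ⟨le_refl _, by omega, hp, fun L h1 h2 => absurd h1 (by omega)⟩
termination_by (hi - lo).toNat
decreasing_by
  · simp only [show lo + 1 + hi = lo + hi + 1 from by ring] at *; omega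
  · simp only [show lo + 1 + hi = lo + hi + 1 from by ring] at *; omega

-- First-maximum behaviour of Python's max(key=…): running the fold from an accumulator
-- already holding a maximal element keeps it.
theorem pv_keep (key : Int → Int) (m : Int) (l : List Int) (h : ∀ y ∈ l, key y ≤ key m) :
    List.foldl (fun acc x => match acc with
      | none => some x
      | some w => if key w < key x then some x else some w) (some m) l = some m := by
  induction l with
  | nil => rfl
  | cons x t ih =>
    simp only [List.foldl_cons]
    rw [if_neg (not_lt.2 (h x (List.mem_cons_self)))]
    exact ih (fun y hy => h y (List.mem_cons_of_mem _ hy))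

theorem pv_first_aux (key : Int → Int) (m : Int) (l2 : List Int)
    (h2 : ∀ y ∈ l2, key y ≤ key m) :
    ∀ l1 : List Int, (∀ y ∈ l1, key y < key m) →
      ∀ acc : Option Int, (∀ c, acc = some c → key c < key m) →
      List.foldl (fun acc x => match acc with
        | none => some x
        | some w => if key w < key x then some x else some w) acc (l1 ++ m :: l2) = some m := by
  intro l1
  induction l1 with
  | nil =>
    intro _ acc hacc
    simp only [List.nil_append, List.foldl_cons]
    cases acc with
    | none => exact pv_keep key m l2 h2
    | some c =>
      show List.foldl _ (if key c < key m then some m else some c) l2 = some m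
      rw [if_pos (hacc c rfl)]
      exact pv_keep key m l2 h2
  | cons x t ih =>
    intro h1 acc hacc
    simp only [List.cons_append, List.foldl_cons]
    apply ih (fun y hy => h1 y (List.mem_cons_of_mem _ hy))
    intro c hc
    cases acc with
    | none =>
      simp only [Option.some.injEq] at hc
      rw [← hc]; exact h1 x List.mem_cons_self
    | some c0 =>
      by_cases hcc : key c0 < key x
      · simp only [if_pos hcc, Option.some.injEq] at hc
        rw [← hc]; exact h1 x List.mem_cons_self
      · simp only [if_neg hcc, Option.some.injEq] at hc
        rw [← hc]; exact hacc c0 rfl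

-- Python's max(l1 ++ [m] ++ l2, key=key) = m when everything before m is strictly
-- smaller under key and everything after is no larger (ties keep the first).
theorem pv_first (key : Int → Int) (l1 l2 : List Int) (m : Int)
    (h1 : ∀ y ∈ l1, key y < key m) (h2 : ∀ y ∈ l2, key y ≤ key m) :
    PySem.List.max? (l1 ++ m :: l2) key = some m := by
  simp only [PySem.List.max?]
  rw [PySem.List.foldl_congr_mem _ _
    (fun acc x => match acc with
      | none => some x
      | some w => if key w < key x then some x else some w) _
    (fun acc x _ => by cases acc <;> rfl)]
  exact pv_first_aux key m l2 h2 l1 h1 none (fun c hc => by cases hc)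

-- The maximum (key = |·|) of the flat-map over range(0, n): split at the position j
-- contributing the winner w, bound everything before strictly and after weakly.
theorem pv_max_flatMap (g : Int → List Int) (n j w : Int) (P Q : List Int)
    (h0 : 0 ≤ j) (hj : j < n) (hsplit : g j = P ++ w :: Q)
    (hbefore : ∀ i, 0 ≤ i → i < j → ∀ y ∈ g i, |y| < |w|)
    (hP : ∀ y ∈ P, |y| < |w|)
    (hQ : ∀ y ∈ Q, |y| ≤ |w|)
    (hafter : ∀ i, j < i → i < n → ∀ y ∈ g i, |y| ≤ |w|) :
    PySem.List.max? ((PySem.List.pyRange 0 n 1).flatMap g) (fun x => |x|) = some w := by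
  rw [PySem.List.pyRange_one_append 0 j n h0 (by omega),
      PySem.List.pyRange_one_cons (by omega : j < n),
      List.flatMap_append, List.flatMap_cons, hsplit]
  rw [show (PySem.List.pyRange 0 j 1).flatMap g ++
        (P ++ w :: Q ++ (PySem.List.pyRange (j + 1) n 1).flatMap g) =
      ((PySem.List.pyRange 0 j 1).flatMap g ++ P) ++
        w :: (Q ++ (PySem.List.pyRange (j + 1) n 1).flatMap g) from by simp]
  apply pv_first
  · intro y hy
    rcases List.mem_append.1 hy with hy | hy
    · rcases List.mem_flatMap.1 hy with ⟨i, hi, hyi⟩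
      rcases PySem.List.mem_pyRange_one.1 hi with ⟨hi0, hij⟩
      exact hbefore i hi0 hij y hyi
    · exact hP y hy
  · intro y hy
    rcases List.mem_append.1 hy with hy | hy
    · exact hQ y hy
    · rcases List.mem_flatMap.1 hy with ⟨i, hi, hyi⟩
      rcases PySem.List.mem_pyRange_one.1 hi with ⟨hi0, hij⟩
      exact hafter i (by omega) (by omega) y hyi

-- Downward monotonicity of "the length-L suffix of b occurs in a" (as the literal
-- predicate of the binary search) in L.
theorem pv_monoS (a b : String) (L M : Int) (h0 : 0 ≤ L) (hLM : L ≤ M)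
    (hM : M ≤ PySem.Str.len b)
    (h : PySem.Str.isIn (PySem.Str.slice b (some (PySem.Str.len b - M)) none) a = true) :
    PySem.Str.isIn (PySem.Str.slice b (some (PySem.Str.len b - L)) none) a = true := by
  simp only [PySem.Str.len_eq] at hM
  simp only [PySem.Str.isIn_eq, PySem.Str.toList_slice, PySem.Chars.slice_eq_listSlice,
    PySem.Chars.isIn_iff_infix, PySem.Str.len_eq, PySem.List.slice_some_none] at h ⊢
  have hmono : PySem.List.clampIdx b.toList.length ((b.toList.length : Int) - M) ≤
      PySem.List.clampIdx b.toList.length ((b.toList.length : Int) - L) := by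
    simp only [PySem.List.clampIdx]; split_ifs <;> omega
  refine List.IsInfix.trans ?_ h
  have hd : b.toList.drop (PySem.List.clampIdx b.toList.length ((b.toList.length : Int) - L)) =
      (b.toList.drop (PySem.List.clampIdx b.toList.length ((b.toList.length : Int) - M))).drop
        (PySem.List.clampIdx b.toList.length ((b.toList.length : Int) - L) -
          PySem.List.clampIdx b.toList.length ((b.toList.length : Int) - M)) := by
    rw [List.drop_drop]; congr 1; omega
  rw [hd]
  exact (List.drop_suffix _ _).isInfix

theorem pv_monoP (a b : String) (L M : Int) (h0 : 0 ≤ L) (hLM : L ≤ M)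
    (h : PySem.Str.isIn (PySem.Str.slice b none (some M)) a = true) :
    PySem.Str.isIn (PySem.Str.slice b none (some L)) a = true := by
  simp only [PySem.Str.isIn_eq, PySem.Str.toList_slice, PySem.Chars.slice_eq_listSlice,
    PySem.Chars.isIn_iff_infix] at h ⊢
  have hL : PySem.List.slice b.toList none (some L) = b.toList.take L.toNat :=
    PySem.List.slice_to _ h0
  have hM : PySem.List.slice b.toList none (some M) = b.toList.take M.toNat :=
    PySem.List.slice_to _ (by omega)
  rw [hL]; rw [hM] at h
  refine List.IsInfix.trans ?_ h
  have ht : b.toList.take L.toNat = (b.toList.take M.toNat).take L.toNat := by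
    rw [List.take_take]; congr 1; omega
  rw [ht]
  exact (List.take_prefix _ _).isInfix

-- find(sub) != -1 and sub in s agree.
theorem pv_find_isIn (a s : String) :
    ((PySem.Str.find a s != -1) = true) ↔ (PySem.Str.isIn s a = true) := by
  simp only [PySem.Str.find_eq, PySem.Str.isIn_eq, bne_iff_ne, ne_eq,
    PySem.Chars.isIn_iff_infix, ← PySem.Chars.find_ne_neg_one_iff, ne_eq]

-- pvLargest on an empty interval returns lo.
theorem pvLargest_self (pred : Int → Bool) (lo : Int) : pvLargest pred lo lo = lo := by
  rw [pvLargest]; simp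

theorem pv_main (a b : String) : sym_val_2 a b = sym_val_2_alt a b := by
  have hlen : PySem.Str.len b = (b.toList.length : Int) := PySem.Str.len_eq b
  by_cases hn0 : PySem.Str.len b ≤ 0
  · -- empty b: both sides are 0
    have h0 : PySem.Str.len b = 0 := by omega
    simp only [sym_val_2, sym_val_2_alt, h0]
    rw [PySem.List.pyRange_one_eq_nil (le_refl 0)]
    simp [pvLargest_self]
  · -- 1 ≤ len b
    have hpos : 0 < PySem.Str.len b := by omega
    simp only [sym_val_2, sym_val_2_alt]
    rw [if_pos hpos]
    set nI := PySem.Str.len b with hnIdef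
    -- binary-search results and their specifications
    have hpS0 : (fun L => PySem.Str.isIn (PySem.Str.slice b (some (nI - L)) none) a) 0 = true := by
      show PySem.Str.isIn (PySem.Str.slice b (some (nI - 0)) none) a = true
      simp only [sub_zero, PySem.Str.isIn_eq, PySem.Str.toList_slice,
        PySem.Chars.slice_eq_listSlice]
      rw [PySem.List.slice_from _ (by omega)]
      have ht : nI.toNat = b.toList.length := by omega
      rw [ht, List.drop_length]
      exact PySem.Chars.isIn_nil _
    have hpP0 : (fun L => PySem.Str.isIn (PySem.Str.slice b none (some L)) a) 0 = true := by
      show PySem.Str.isIn (PySem.Str.slice b none (some 0)) a = true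
      simp only [PySem.Str.isIn_eq, PySem.Str.toList_slice, PySem.Chars.slice_eq_listSlice]
      rw [PySem.List.slice_to _ (le_refl 0)]
      simp [PySem.Chars.isIn_nil]
    obtain ⟨hls0, hlsn, hlsT, hlsF⟩ :=
      pvLargest_spec (fun L => PySem.Str.isIn (PySem.Str.slice b (some (nI - L)) none) a) nI
        (fun L M h0 hLM hMB hp => pv_monoS a b L M h0 hLM hMB hp)
        0 nI (le_refl 0) (by omega) (le_refl nI) hpS0
    obtain ⟨hlp0, hlpn, hlpT, hlpF⟩ :=
      pvLargest_spec (fun L => PySem.Str.isIn (PySem.Str.slice b none (some L)) a) (nI - 1)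
        (fun L M h0 hLM _ hp => pv_monoP a b L M h0 hLM hp)
        0 (nI - 1) (le_refl 0) (by omega) (le_refl _) hpP0
    set ls := pvLargest (fun L => PySem.Str.isIn (PySem.Str.slice b (some (nI - L)) none) a) 0 nI
      with hlsdef
    set lp := pvLargest (fun L => PySem.Str.isIn (PySem.Str.slice b none (some L)) a) 0 (nI - 1)
      with hlpdef
    -- the loop conditions of A, characterised by the binary-search results
    have hc1 : ∀ i : Int, 0 ≤ i → i < nI →
        (((PySem.Str.find a (PySem.Str.slice b (some i) none) != -1) = true) ↔ nI - i ≤ ls) := by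
      intro i hi0 hin
      rw [pv_find_isIn]
      constructor
      · intro h
        by_contra hgt
        rw [not_le] at hgt
        have hF := hlsF (nI - i) (by omega) (by omega)
        rw [show nI - (nI - i) = i from by ring] at hF
        rw [h] at hF
        cases hF
      · intro hle
        have hm := pv_monoS a b (nI - i) ls (by omega) (by omega)
          (by rw [← hnIdef]; omega) hlsT
        rw [← hnIdef] at hm
        rwa [show nI - (nI - i) = i from by ring] at hm
    have hc2 : ∀ i : Int, 0 ≤ i → i < nI →
        (((PySem.Str.find a (PySem.Str.slice b none (some i)) != -1) = true) ↔ i ≤ lp) := by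
      intro i hi0 hin
      rw [pv_find_isIn]
      constructor
      · intro h
        by_contra hgt
        rw [not_le] at hgt
        have hF := hlpF i (by omega) (by omega)
        rw [h] at hF
        cases hF
      · intro hle
        exact pv_monoP a b i lp hi0 hle hlpT
    -- the two appended lengths
    have hv1 : ∀ i : Int, 0 ≤ i → i ≤ nI →
        PySem.Str.len (PySem.Str.slice b (some i) none) = nI - i := by
      intro i hi0 hin
      rw [PySem.Str.len_eq, PySem.Str.toList_slice, PySem.Chars.slice_eq_listSlice,
        PySem.List.slice_from _ hi0, List.length_drop]
      omega
    have hv2 : ∀ i : Int, 0 ≤ i → i ≤ nI →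
        PySem.Str.len (PySem.Str.slice b none (some i)) = i := by
      intro i hi0 hin
      rw [PySem.Str.len_eq, PySem.Str.toList_slice, PySem.Chars.slice_eq_listSlice,
        PySem.List.slice_to _ hi0, List.length_take]
      omega
    -- per-index contribution of A's loop
    set g' : Int → List Int := fun i =>
      (if nI - i ≤ ls then [i - nI] else []) ++ (if i ≤ lp then [i] else []) with hg'
    have hmem : ∀ i y, y ∈ g' i → (nI - i ≤ ls ∧ y = i - nI) ∨ (i ≤ lp ∧ y = i) := by
      intro i y hy
      simp only [hg'] at hy
      rcases List.mem_append.1 hy with hy | hy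
      · left
        split_ifs at hy with hc
        · exact ⟨hc, by simpa using hy⟩
        · simp at hy
      · right
        split_ifs at hy with hc
        · exact ⟨hc, by simpa using hy⟩
        · simp at hy
    have hbody : ∀ (acc : List Int), ∀ i ∈ PySem.List.pyRange 0 nI 1,
        (fun sym i =>
          if (PySem.Str.find a (PySem.Str.slice b none (some i)) != -1) = true then
            (if (PySem.Str.find a (PySem.Str.slice b (some i) none) != -1) = true then
                sym ++ [-1 * PySem.Str.len (PySem.Str.slice b (some i) none)]
              else sym) ++
              [PySem.Str.len (PySem.Str.slice b none (some i))]
          else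
            if (PySem.Str.find a (PySem.Str.slice b (some i) none) != -1) = true then
              sym ++ [-1 * PySem.Str.len (PySem.Str.slice b (some i) none)]
            else sym) acc i = acc ++ g' i := by
      intro acc i hi
      rcases PySem.List.mem_pyRange_one.1 hi with ⟨hi0, hin⟩
      dsimp only
      rw [hv1 i hi0 (by omega), hv2 i hi0 (by omega),
        show (-1 : Int) * (nI - i) = i - nI from by ring]
      by_cases h1 : nI - i ≤ ls <;> by_cases h2 : i ≤ lp
      · rw [if_pos ((hc2 i hi0 hin).2 h2), if_pos ((hc1 i hi0 hin).2 h1)]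
        simp only [hg']
        rw [if_pos h1, if_pos h2, List.append_assoc]
      · rw [if_neg (fun hb => h2 ((hc2 i hi0 hin).1 hb)), if_pos ((hc1 i hi0 hin).2 h1)]
        simp only [hg']
        rw [if_pos h1, if_neg h2, List.append_nil]
      · rw [if_pos ((hc2 i hi0 hin).2 h2), if_neg (fun hb => h1 ((hc1 i hi0 hin).1 hb))]
        simp only [hg']
        rw [if_neg h1, if_pos h2, List.nil_append]
      · rw [if_neg (fun hb => h2 ((hc2 i hi0 hin).1 hb)),
          if_neg (fun hb => h1 ((hc1 i hi0 hin).1 hb))]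
        simp only [hg']
        rw [if_neg h1, if_neg h2, List.append_nil, List.append_nil]
    rw [PySem.List.foldl_congr_mem _ _ (fun acc i => acc ++ g' i) _ hbody,
      show List.foldl (fun acc i => acc ++ g' i) [] (PySem.List.pyRange 0 nI 1) =
          (PySem.List.pyRange 0 nI 1).flatMap g' from by
        simpa using PySem.List.foldl_append_eq_flatMap g' (PySem.List.pyRange 0 nI 1) []]
    -- the list is nonempty (the empty prefix is always found)
    have h0mem : (0 : Int) ∈ (PySem.List.pyRange 0 nI 1).flatMap g' := by
      refine List.mem_flatMap.2 ⟨0, PySem.List.mem_pyRange_one.2 ⟨le_refl 0, hpos⟩, ?_⟩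
      simp [hg', hlp0]
    rw [if_pos (show (((PySem.List.pyRange 0 nI 1).flatMap g').length != 0) = true by
      simp only [bne_iff_ne, ne_eq, List.length_eq_zero_iff]
      intro h
      rw [h] at h0mem
      cases h0mem)]
    simp only [PySem.List.maxD]
    -- case analysis on the winner
    by_cases hgt : lp < ls
    · -- longest suffix strictly longer: first maximal entry is -ls, at i = nI - ls
      rw [pv_max_flatMap g' nI (nI - ls) (nI - ls - nI) []
          (if nI - ls ≤ lp then [nI - ls] else []) (by omega) (by omega)
          (by simp only [hg']
              rw [if_pos (by omega : nI - (nI - ls) ≤ ls)]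
              simp)
          (by intro i hi0 hij y hy
              rcases hmem i y hy with ⟨hc, rfl⟩ | ⟨hc, rfl⟩
              · rw [abs_of_nonpos (by omega), abs_of_nonpos (by omega)]; omega
              · rw [abs_of_nonneg (by omega), abs_of_nonpos (by omega)]; omega)
          (by intro y hy; simp at hy)
          (by intro y hy
              split_ifs at hy with hcq
              · simp only [List.mem_singleton] at hy
                subst hy
                rw [abs_of_nonneg (by omega), abs_of_nonpos (by omega)]; omega
              · simp at hy)
          (by intro i hij hin y hy
              rcases hmem i y hy with ⟨hc, rfl⟩ | ⟨hc, rfl⟩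
              · rw [abs_of_nonpos (by omega), abs_of_nonpos (by omega)]; omega
              · rw [abs_of_nonneg (by omega), abs_of_nonpos (by omega)]; omega),
        Option.getD_some, if_pos hgt]
      omega
    · by_cases hlt : ls < lp
      · -- longest proper prefix strictly longer: first maximal entry is lp, at i = lp
        rw [pv_max_flatMap g' nI lp lp (if nI - lp ≤ ls then [lp - nI] else []) []
            (by omega) (by omega)
            (by simp only [hg']
                rw [if_pos (le_refl lp)])
            (by intro i hi0 hij y hy
                rcases hmem i y hy with ⟨hc, rfl⟩ | ⟨hc, rfl⟩
                · rw [abs_of_nonpos (by omega), abs_of_nonneg (by omega)]; omega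
                · rw [abs_of_nonneg (by omega), abs_of_nonneg (by omega)]; omega)
            (by intro y hy
                split_ifs at hy with hcq
                · simp only [List.mem_singleton] at hy
                  subst hy
                  rw [abs_of_nonpos (by omega), abs_of_nonneg (by omega)]; omega
                · simp at hy)
            (by intro y hy; simp at hy)
            (by intro i hij hin y hy
                rcases hmem i y hy with ⟨hc, rfl⟩ | ⟨hc, rfl⟩
                · rw [abs_of_nonpos (by omega), abs_of_nonneg (by omega)]; omega
                · rw [abs_of_nonneg (by omega), abs_of_nonneg (by omega)]; omega),
          Option.getD_some, if_neg (by omega), if_pos hlt]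
      · -- tie ls = lp
        have heq : ls = lp := by omega
        by_cases h2 : nI ≤ 2 * ls
        · -- the suffix entry -ls comes first (or in the same iteration): result -ls
          rw [pv_max_flatMap g' nI (nI - ls) (nI - ls - nI) []
              (if nI - ls ≤ lp then [nI - ls] else []) (by omega) (by omega)
              (by simp only [hg']
                  rw [if_pos (by omega : nI - (nI - ls) ≤ ls)]
                  simp)
              (by intro i hi0 hij y hy
                  rcases hmem i y hy with ⟨hc, rfl⟩ | ⟨hc, rfl⟩
                  · rw [abs_of_nonpos (by omega), abs_of_nonpos (by omega)]; omega
                  · rw [abs_of_nonneg (by omega), abs_of_nonpos (by omega)]; omega)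
              (by intro y hy; simp at hy)
              (by intro y hy
                  split_ifs at hy with hcq
                  · simp only [List.mem_singleton] at hy
                    subst hy
                    rw [abs_of_nonneg (by omega), abs_of_nonpos (by omega)]; omega
                  · simp at hy)
              (by intro i hij hin y hy
                  rcases hmem i y hy with ⟨hc, rfl⟩ | ⟨hc, rfl⟩
                  · rw [abs_of_nonpos (by omega), abs_of_nonpos (by omega)]; omega
                  · rw [abs_of_nonneg (by omega), abs_of_nonpos (by omega)]; omega),
            Option.getD_some, if_neg (by omega), if_neg (by omega), if_pos (by omega)]
          omega
        · -- the prefix entry lp = ls comes first: result ls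
          rw [pv_max_flatMap g' nI ls ls [] [] (by omega) (by omega)
              (by simp only [hg']
                  rw [if_neg (by omega : ¬ nI - ls ≤ ls), if_pos (by omega : ls ≤ lp)])
              (by intro i hi0 hij y hy
                  rcases hmem i y hy with ⟨hc, rfl⟩ | ⟨hc, rfl⟩
                  · rw [abs_of_nonpos (by omega), abs_of_nonneg (by omega)]; omega
                  · rw [abs_of_nonneg (by omega), abs_of_nonneg (by omega)]; omega)
              (by intro y hy; simp at hy)
              (by intro y hy; simp at hy)
              (by intro i hij hin y hy
                  rcases hmem i y hy with ⟨hc, rfl⟩ | ⟨hc, rfl⟩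
                  · rw [abs_of_nonpos (by omega), abs_of_nonneg (by omega)]; omega
                  · rw [abs_of_nonneg (by omega), abs_of_nonneg (by omega)]; omega),
            Option.getD_some, if_neg (by omega), if_neg (by omega), if_neg (by omega)]

-- ===== VERDICT (by name: the statement is the Claim_ definition above) =====
theorem sym_val_2_spec : Claim_equal_sym_val_2 := by
  intro a b _
  unfold Spec_sym_val_2
  exact pv_main a b
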